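-- pv_equiv track=rewrite | github.com/juba/advent-2023 | days/13.py | find_axis
-- ===== SOURCE A (Python) =====
-- def find_axis(values):
--     n = len(values)
--     axes = [i for i in range(n - 1) if values[i] == values[i + 1]]
--     for axis in axes:
--         left = values[max([0, 2 * axis - n + 2]) : axis + 1]
--         right = values[min([n, 2 * (axis + 1) - 1]) : axis : -1]
--         if left == right:
--             return axis + 1
--     return 0
-- ===== SOURCE B (Python) =====
-- def find_axis(values):
--     n = len(values)
--     for k in range(1, n):
--         i, j = k - 1, k
--         while i >= 0 and j < n and values[i] == values[j]:
--             i -= 1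
--             j += 1
--         if i < 0 or j >= n:
--             return k
--     return 0
-- ===== Notes on version B (the rewrite author's own statement) =====
-- stated objective: alternative
-- what changed: Replaces A's candidate prefilter plus per-candidate slice construction (left segment and a reversed right slice) and whole-list comparison with a direct two-pointer outward scan from each center that stops at the first mismatch or boundary, allocating no intermediate lists.
import Mathlib
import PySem

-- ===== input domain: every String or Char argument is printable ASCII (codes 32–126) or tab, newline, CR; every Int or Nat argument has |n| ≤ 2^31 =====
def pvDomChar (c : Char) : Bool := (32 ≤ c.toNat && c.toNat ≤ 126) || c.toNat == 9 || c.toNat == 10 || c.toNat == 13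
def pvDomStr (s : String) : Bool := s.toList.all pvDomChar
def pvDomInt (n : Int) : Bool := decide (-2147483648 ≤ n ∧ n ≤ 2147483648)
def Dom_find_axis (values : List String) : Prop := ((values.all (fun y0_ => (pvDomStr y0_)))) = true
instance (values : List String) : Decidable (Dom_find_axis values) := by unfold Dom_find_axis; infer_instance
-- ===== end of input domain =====

-- B replaces A's slice-building comparison with a two-pointer outward scan per center; alternative structure, no speed claim.

-- ===== PORT A =====
-- 'for axis in axes: … return axis + 1 … return 0'
def findAxisGo (values : List String) (n : Int) : List Int → Int
  | [] => 0
  | axis :: rest =>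
    let left := PySem.List.slice values (some (max 0 (2 * axis - n + 2))) (some (axis + 1))
    -- step -1 is nonzero, so slice? always returns some; .getD [] only discharges the option
    let right := (PySem.List.slice? values (some (min n (2 * (axis + 1) - 1))) (some axis) (-1)).getD []
    if left == right then axis + 1 else findAxisGo values n rest

def find_axis (values : List String) : Int :=
  let n : Int := values.length
  let axes := (PySem.List.pyRange 0 (n - 1) 1).filter
      (fun i => PySem.List.pyGet? values i == PySem.List.pyGet? values (i + 1))
  findAxisGo values n axes

-- ===== PORT B =====
-- the 'while i >= 0 and j < n and values[i] == values[j]' loop; returns the final (i, j)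
def altScan (values : List String) (i j : Int) : Int × Int :=
  if h : 0 ≤ i ∧ j < (values.length : Int) ∧ PySem.List.pyGet? values i == PySem.List.pyGet? values j then
    altScan values (i - 1) (j + 1)
  else (i, j)
termination_by ((values.length : Int) - j).toNat
decreasing_by
  have := h.2.1
  omega

-- 'for k in range(1, n): … if i < 0 or j >= n: return k … return 0'
def altGo (values : List String) (n : Int) : List Int → Int
  | [] => 0
  | k :: rest =>
    let r := altScan values (k - 1) k
    if r.1 < 0 ∨ n ≤ r.2 then k else altGo values n rest

def find_axis_alt (values : List String) : Int :=
  let n : Int := values.length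
  altGo values n (PySem.List.pyRange 1 n 1)

-- ===== PRECONDITION & SPEC =====
def Spec_find_axis (values : List String) (out : Int) : Prop := out = find_axis_alt values
instance (values : List String) (out : Int) : Decidable (Spec_find_axis values out) := by unfold Spec_find_axis; infer_instance

-- ===== CLAIM (what is proved, stated in full; the proofs are below) =====
def Claim_equal_find_axis : Prop := ∀ (values : List String), Dom_find_axis values → Spec_find_axis values (find_axis values)

-- ===== LEMMAS AND PROOFS =====

-- the common mirror predicate: all in-range reflected pairs around the gap after index a agree
def Mir (values : List String) (a m : Nat) : Prop :=
  ∀ u : Nat, u < m → values.getD (a - u) "" = values.getD (a + 1 + u) ""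

-- a contiguous segment written as a map over a range of indices
lemma seg_eq_map (xs : List String) (off m : Nat) (h : off + m ≤ xs.length) :
    (xs.drop off).take m = (List.range m).map (fun t => xs.getD (off + t) "") := by
  apply List.ext_getElem
  · simp; omega
  · intro i h1 h2
    simp only [List.getElem_take, List.getElem_drop, List.getElem_map, List.getElem_range]
    rw [List.getD_eq_getElem?_getD, List.getElem?_eq_getElem (by simp at h1 ⊢; omega)]
    simp

lemma left_eq (values : List String) (a : Nat) (hn : a + 1 < values.length) :
    PySem.List.slice values (some (max 0 (2 * (a : Int) - (values.length : Int) + 2))) (some ((a : Int) + 1)) =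
      (List.range (min (a + 1) (values.length - 1 - a))).map
        (fun t => values.getD (a + 1 - min (a + 1) (values.length - 1 - a) + t) "") := by
  set m := min (a + 1) (values.length - 1 - a) with hm
  rw [PySem.List.slice_toNat _ (by omega) (by omega)]
  have h1 : (max 0 (2 * (a : Int) - (values.length : Int) + 2)).toNat = a + 1 - m := by omega
  have h2 : ((a : Int) + 1).toNat = a + 1 := by omega
  rw [h1, h2]
  have h3 : a + 1 - (a + 1 - m) = m := by omega
  rw [h3, seg_eq_map values (a + 1 - m) m (by omega)]

lemma right_eq (values : List String) (a : Nat) (hn : a + 1 < values.length) :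
    (PySem.List.slice? values (some (min (values.length : Int) (2 * ((a : Int) + 1) - 1))) (some (a : Int)) (-1)).getD [] =
      (List.range (min (a + 1) (values.length - 1 - a))).map
        (fun k => values.getD (a + min (a + 1) (values.length - 1 - a) - k) "") := by
  set m := min (a + 1) (values.length - 1 - a) with hm
  unfold PySem.List.slice? PySem.List.sliceIndices
  norm_num
  split_ifs with h1 h2 h3 <;> try omega
  have hc : ((min (2 * ((a : Int) + 1) - 1) ((values.length : Int) - 1)) - (min ((a : Int)) ((values.length : Int) - 1))).toNat = m := by omega
  rw [hc]
  have hfg : ∀ x ∈ List.range m,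
      values[((min (2 * ((a : Int) + 1) - 1) ((values.length : Int) - 1)) + -(x : Int)).toNat]? =
        some ((fun k => values[a + m - k]?.getD "") x) := by
    intro x hx
    rw [List.mem_range] at hx
    have hidx : ((min (2 * ((a : Int) + 1) - 1) ((values.length : Int) - 1)) + -(x : Int)).toNat = a + m - x := by omega
    rw [hidx, List.getElem?_eq_getElem (by omega)]
    simp [List.getElem?_eq_getElem (show a + m - x < values.length by omega)]
  rw [List.filterMap_congr hfg]
  simp

-- A's slice condition characterised by the mirror predicate
lemma condA_iff (values : List String) (a : Nat) (hn : a + 1 < values.length) :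
    (PySem.List.slice values (some (max 0 (2 * (a : Int) - (values.length : Int) + 2))) (some ((a : Int) + 1)) =
      (PySem.List.slice? values (some (min (values.length : Int) (2 * ((a : Int) + 1) - 1))) (some (a : Int)) (-1)).getD [])
    ↔ Mir values a (min (a + 1) (values.length - 1 - a)) := by
  set m := min (a + 1) (values.length - 1 - a) with hm
  rw [left_eq values a hn, right_eq values a hn, List.map_inj_left]
  constructor
  · intro h u hu
    have := h (m - 1 - u) (List.mem_range.mpr (by omega))
    rw [show a + 1 - m + (m - 1 - u) = a - u by omega,
        show a + m - (m - 1 - u) = a + 1 + u by omega] at this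
    exact this
  · intro h t ht
    rw [List.mem_range] at ht
    have := h (m - 1 - t) (by omega)
    rw [show a - (m - 1 - t) = a + 1 - m + t by omega,
        show a + 1 + (m - 1 - t) = a + m - t by omega] at this
    exact this

-- one Python element comparison, as the corresponding getD equation
lemma opt_eq (values : List String) (a u : Nat) (hu : u ≤ a) (hb : a + 1 + u < values.length) :
    (PySem.List.pyGet? values ((a : Int) - u) == PySem.List.pyGet? values ((a : Int) + 1 + u)) = true
    ↔ values.getD (a - u) "" = values.getD (a + 1 + u) "" := by
  have h1 : (a : Int) - u = ((a - u : Nat) : Int) := by omega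
  have h2 : (a : Int) + 1 + u = ((a + 1 + u : Nat) : Int) := by omega
  rw [h1, h2, PySem.List.pyGet?_natCast, PySem.List.pyGet?_natCast, beq_iff_eq]
  rw [List.getElem?_eq_getElem (by omega), List.getElem?_eq_getElem (by omega)]
  simp [List.getD_eq_getElem?_getD, List.getElem?_eq_getElem (show a - u < values.length by omega),
    List.getElem?_eq_getElem hb]

-- B's scan characterised: the scan started u steps out reaches a boundary iff all remaining pairs agree
lemma altScan_iff (values : List String) (a : Nat) (hn : a + 1 < values.length) :
    ∀ u : Nat, u ≤ min (a + 1) (values.length - 1 - a) →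
      (((altScan values ((a : Int) - u) ((a : Int) + 1 + u)).1 < 0 ∨
        (values.length : Int) ≤ (altScan values ((a : Int) - u) ((a : Int) + 1 + u)).2)
       ↔ (∀ v : Nat, u ≤ v → v < min (a + 1) (values.length - 1 - a) →
            values.getD (a - v) "" = values.getD (a + 1 + v) "")) := by
  set m := min (a + 1) (values.length - 1 - a) with hm
  intro u hu
  induction hd : m - u generalizing u with
  | zero =>
    have hum : u = m := by omega
    subst hum
    rw [altScan, dif_neg (by omega)]
    constructor
    · intro _ v hv1 hv2; omega
    · intro _; dsimp only; omega
  | succ d ih =>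
    have hum : u < m := by omega
    have hua : u ≤ a := by omega
    have hub : a + 1 + u < values.length := by omega
    by_cases he : (PySem.List.pyGet? values ((a : Int) - u) == PySem.List.pyGet? values ((a : Int) + 1 + u)) = true
    · rw [altScan, dif_pos ⟨by omega, by omega, he⟩]
      have e1 : (a : Int) - u - 1 = (a : Int) - (u + 1 : Nat) := by push_cast; ring
      have e2 : (a : Int) + 1 + u + 1 = (a : Int) + 1 + (u + 1 : Nat) := by push_cast; ring
      rw [e1, e2, ih (u + 1) (by omega) (by omega)]
      constructor
      · intro h v hv1 hv2
        rcases Nat.eq_or_lt_of_le hv1 with rfl | hlt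
        · exact (opt_eq values a u hua hub).mp he
        · exact h v hlt hv2
      · intro h v hv1 hv2
        exact h v (by omega) hv2
    · rw [altScan, dif_neg (by intro hc; exact he hc.2.2)]
      constructor
      · intro h
        dsimp only at h
        omega
      · intro h
        exact absurd ((opt_eq values a u hua hub).mpr (h u le_rfl hum)) he

-- B's loop condition at candidate k = a + 1, as the mirror predicate
lemma condB_iff (values : List String) (a : Nat) (hn : a + 1 < values.length) :
    (((altScan values ((a : Int) + 1 - 1) ((a : Int) + 1)).1 < 0 ∨
      (values.length : Int) ≤ (altScan values ((a : Int) + 1 - 1) ((a : Int) + 1)).2)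
     ↔ Mir values a (min (a + 1) (values.length - 1 - a))) := by
  rw [show (a : Int) + 1 - 1 = (a : Int) - ((0 : Nat) : Int) by push_cast; ring,
      show (a : Int) + 1 = (a : Int) + 1 + ((0 : Nat) : Int) by push_cast; ring]
  refine (altScan_iff values a hn 0 (by omega)).trans ?_
  constructor
  · intro h u hu; exact h u (Nat.zero_le _) hu
  · intro h v _ hv; exact h v hv

lemma loops_eq (values : List String) (L : List Int)
    (hL : ∀ y ∈ L, ∃ a : Nat, y = (a : Int) ∧ a + 1 < values.length) :
    findAxisGo values (values.length : Int)
        (L.filter (fun i => PySem.List.pyGet? values i == PySem.List.pyGet? values (i + 1)))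
      = altGo values (values.length : Int) (L.map (· + 1)) := by
  induction L with
  | nil => rfl
  | cons y rest ih =>
    obtain ⟨a, rfl, ha⟩ := hL y (List.mem_cons_self ..)
    have hrest := ih (fun z hz => hL z (List.mem_cons_of_mem _ hz))
    rw [List.map_cons, List.filter_cons]
    by_cases hp : (PySem.List.pyGet? values (a : Int) == PySem.List.pyGet? values ((a : Int) + 1)) = true
    · rw [if_pos hp, findAxisGo, altGo]
      by_cases hMir : Mir values a (min (a + 1) (values.length - 1 - a))
      · rw [if_pos (beq_iff_eq.mpr ((condA_iff values a ha).mpr hMir)),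
            if_pos ((condB_iff values a ha).mpr hMir)]
      · rw [if_neg (fun hc => hMir ((condA_iff values a ha).mp (beq_iff_eq.mp hc))),
            if_neg (fun hc => hMir ((condB_iff values a ha).mp hc))]
        exact hrest
    · rw [if_neg hp, altGo]
      have hstop : altScan values ((a : Int) + 1 - 1) ((a : Int) + 1) = ((a : Int), (a : Int) + 1) := by
        rw [show (a : Int) + 1 - 1 = (a : Int) by ring, altScan, dif_neg]
        intro hc
        exact hp hc.2.2
      rw [if_neg (by rw [hstop]; dsimp only; omega)]
      exact hrest

lemma pyRange_shift (n : Int) :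
    PySem.List.pyRange 1 n 1 = (PySem.List.pyRange 0 (n - 1) 1).map (· + 1) := by
  unfold PySem.List.pyRange
  norm_num
  split_ifs with h1 <;> intro a _ <;> ring

lemma pyRange_mem (values : List String) :
    ∀ y ∈ PySem.List.pyRange 0 ((values.length : Int) - 1) 1,
      ∃ a : Nat, y = (a : Int) ∧ a + 1 < values.length := by
  intro y hy
  unfold PySem.List.pyRange at hy
  norm_num at hy
  obtain ⟨k, hk, rfl⟩ := hy
  refine ⟨k, rfl, ?_⟩
  split_ifs at hk <;> omega

-- ===== VERDICT (by name: the statement is the Claim_ definition above) =====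
theorem find_axis_spec : Claim_equal_find_axis := by
  intro values _
  show find_axis values = find_axis_alt values
  show findAxisGo values (values.length : Int)
      ((PySem.List.pyRange 0 ((values.length : Int) - 1) 1).filter
        (fun i => PySem.List.pyGet? values i == PySem.List.pyGet? values (i + 1)))
    = altGo values (values.length : Int) (PySem.List.pyRange 1 (values.length : Int) 1)
  rw [pyRange_shift]
  exact loops_eq values _ (pyRange_mem values)
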